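-- pv_equiv track=rewrite | github.com/eichblatt/chordshapes | fingerings.py | frets_for_pitch
-- ===== SOURCE A (Python) =====
-- def frets_for_pitch(string_pc: int, chord_pcs, max_fret: int):
--     frets = []
--     if string_pc in chord_pcs:
--         frets.append(0)
--     for fret in range(1, max_fret + 1):
--         if (string_pc + fret) % 12 in chord_pcs:
--             frets.append(fret)
--     return frets
-- ===== SOURCE B (Python) =====
-- def frets_for_pitch(string_pc: int, chord_pcs, max_fret: int):
--     res = set()
--     if string_pc in chord_pcs:
--         res.add(0)
--     for p in set(chord_pcs):
--         if 0 <= p <= 11: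
--             base = (p - string_pc) % 12
--             start = base if base >= 1 else 12
--             res.update(range(start, max_fret + 1, 12))
--     return sorted(res)
-- ===== Notes on version B (the rewrite author's own statement) =====
-- stated objective: alternative
-- what changed: Instead of scanning every fret 1..max_fret and testing chord membership, B iterates over the distinct chord pitch classes, generates each one's arithmetic progression of frets (step 12, starting at its first positive fret) into a set, and returns the sorted union; the raw fret-0 open-string check is kept as in A.
import Mathlib
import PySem

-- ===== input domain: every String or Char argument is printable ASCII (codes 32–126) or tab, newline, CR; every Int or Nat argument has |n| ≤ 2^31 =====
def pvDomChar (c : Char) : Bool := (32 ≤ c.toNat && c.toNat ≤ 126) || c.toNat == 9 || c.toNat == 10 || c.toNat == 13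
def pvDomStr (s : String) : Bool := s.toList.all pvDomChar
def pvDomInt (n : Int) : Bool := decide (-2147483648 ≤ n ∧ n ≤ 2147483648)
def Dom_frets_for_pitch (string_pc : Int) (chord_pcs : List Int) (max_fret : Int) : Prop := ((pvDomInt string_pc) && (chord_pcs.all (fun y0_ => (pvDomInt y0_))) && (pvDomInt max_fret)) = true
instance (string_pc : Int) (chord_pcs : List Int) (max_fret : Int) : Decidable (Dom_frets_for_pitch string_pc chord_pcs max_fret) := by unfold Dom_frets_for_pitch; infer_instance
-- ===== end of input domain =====

-- B flips the traversal: instead of scanning every fret and testing chord membership, it generates,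
-- for each chord pitch class, its arithmetic progression of frets (step 12) and merges them into a
-- set, then sorts — an alternative decomposition of the same function (return value only; no mutation).

-- ===== PORT A =====
def frets_for_pitch (string_pc : Int) (chord_pcs : List Int) (max_fret : Int) : List Int :=
  -- frets = []; if string_pc in chord_pcs: frets.append(0)
  let frets : List Int := []
  let frets := if string_pc ∈ chord_pcs then frets ++ [0] else frets
  -- for fret in range(1, max_fret + 1): if (string_pc + fret) % 12 in chord_pcs: frets.append(fret)
  (PySem.List.pyRange 1 (max_fret + 1)).foldl
    (fun acc fret => if PySem.Int.mod (string_pc + fret) 12 ∈ chord_pcs then acc ++ [fret] else acc)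
    frets

-- ===== PORT B =====
def frets_for_pitch_alt (string_pc : Int) (chord_pcs : List Int) (max_fret : Int) : List Int :=
  -- res = set(); if string_pc in chord_pcs: res.add(0)
  let res : PySem.Set Int :=
    if string_pc ∈ chord_pcs then PySem.Set.add PySem.Set.empty 0 else PySem.Set.empty
  -- for p in set(chord_pcs): if 0 <= p <= 11: res.update(range(start, max_fret + 1, 12))
  let res := (PySem.Set.ofList chord_pcs).foldl
    (fun res p =>
      if 0 ≤ p ∧ p ≤ 11 then
        let base := PySem.Int.mod (p - string_pc) 12
        let start := if 1 ≤ base then base else 12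
        PySem.Set.update res (PySem.List.pyRange start (max_fret + 1) 12)
      else res)
    res
  -- return sorted(res)
  PySem.List.sorted res (fun x => x)

-- ===== PRECONDITION & SPEC =====
def Spec_frets_for_pitch (string_pc : Int) (chord_pcs : List Int) (max_fret : Int) (out : List Int) : Prop := out = frets_for_pitch_alt string_pc chord_pcs max_fret
instance (string_pc : Int) (chord_pcs : List Int) (max_fret : Int) (out : List Int) : Decidable (Spec_frets_for_pitch string_pc chord_pcs max_fret out) := by unfold Spec_frets_for_pitch; infer_instance

-- ===== CLAIM (what is proved, stated in full; the proofs are below) =====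
def Claim_equal_frets_for_pitch : Prop := ∀ (string_pc : Int) (chord_pcs : List Int) (max_fret : Int), Dom_frets_for_pitch string_pc chord_pcs max_fret → Spec_frets_for_pitch string_pc chord_pcs max_fret (frets_for_pitch string_pc chord_pcs max_fret)

-- ===== LEMMAS AND PROOFS =====

-- A's list written as prefix ++ filter.
theorem fretsA_eq (string_pc : Int) (chord_pcs : List Int) (max_fret : Int) :
    frets_for_pitch string_pc chord_pcs max_fret =
      (if string_pc ∈ chord_pcs then [(0 : Int)] else []) ++
        (PySem.List.pyRange 1 (max_fret + 1)).filter
          (fun fret => decide (PySem.Int.mod (string_pc + fret) 12 ∈ chord_pcs)) := by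
  unfold frets_for_pitch
  rw [PySem.List.foldl_append_ite_eq_filter
        (fun fret => PySem.Int.mod (string_pc + fret) 12 ∈ chord_pcs)]
  split <;> simp

-- Membership in A's list.
theorem mem_fretsA (string_pc : Int) (chord_pcs : List Int) (max_fret : Int) (f : Int) :
    f ∈ frets_for_pitch string_pc chord_pcs max_fret ↔
      (f = 0 ∧ string_pc ∈ chord_pcs) ∨
        (1 ≤ f ∧ f ≤ max_fret ∧ (string_pc + f) % 12 ∈ chord_pcs) := by
  rw [fretsA_eq]
  simp only [List.mem_append, List.mem_filter, PySem.List.mem_pyRange_one,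
    PySem.Int.mod_eq_emod_of_pos (by norm_num : (0:Int) < 12), decide_eq_true_eq]
  constructor
  · rintro (h | ⟨⟨h1, h2⟩, h3⟩)
    · split at h <;> simp_all
    · exact Or.inr ⟨h1, by omega, h3⟩
  · rintro (⟨rfl, h⟩ | ⟨h1, h2, h3⟩)
    · simp [h]
    · exact Or.inr ⟨⟨h1, by omega⟩, h3⟩

-- A's list is strictly increasing.
theorem pairwise_fretsA (string_pc : Int) (chord_pcs : List Int) (max_fret : Int) :
    List.Pairwise (· < ·) (frets_for_pitch string_pc chord_pcs max_fret) := by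
  rw [fretsA_eq]
  rw [List.pairwise_append]
  refine ⟨?_, (PySem.List.pairwise_lt_pyRange_one 1 (max_fret + 1)).filter _, ?_⟩
  · split <;> simp
  · intro a ha b hb
    have hb' := (List.mem_filter.mp hb).1
    rw [PySem.List.mem_pyRange_one] at hb'
    split at ha <;> simp_all <;> omega

-- Membership in B's accumulated set after the loop over the chord pitch classes.
theorem mem_B_foldl (string_pc max_fret : Int) (l : List Int) (s0 : PySem.Set Int) (f : Int) :
    f ∈ l.foldl
        (fun res p =>
          if 0 ≤ p ∧ p ≤ 11 then
            let base := PySem.Int.mod (p - string_pc) 12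
            let start := if 1 ≤ base then base else 12
            PySem.Set.update res (PySem.List.pyRange start (max_fret + 1) 12)
          else res) s0 ↔
      f ∈ s0 ∨ ∃ p ∈ l, (0 ≤ p ∧ p ≤ 11) ∧
        f ∈ PySem.List.pyRange
              (if 1 ≤ PySem.Int.mod (p - string_pc) 12 then PySem.Int.mod (p - string_pc) 12 else 12)
              (max_fret + 1) 12 := by
  induction l generalizing s0 with
  | nil => simp
  | cons p t ih =>
    simp only [List.foldl_cons, ih]
    by_cases hp : 0 ≤ p ∧ p ≤ 11
    · simp only [if_pos hp, PySem.Set.mem_update]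
      constructor
      · rintro ((h | h) | h)
        · exact Or.inl h
        · exact Or.inr ⟨p, List.mem_cons_self .., hp, h⟩
        · obtain ⟨q, hq, h⟩ := h; exact Or.inr ⟨q, List.mem_cons_of_mem _ hq, h⟩
      · rintro (h | ⟨q, hq, hq1, hq2⟩)
        · exact Or.inl (Or.inl h)
        · rcases List.mem_cons.mp hq with rfl | hq
          · exact Or.inl (Or.inr hq2)
          · exact Or.inr ⟨q, hq, hq1, hq2⟩
    · simp only [if_neg hp]
      constructor
      · rintro (h | ⟨q, hq, h⟩)
        · exact Or.inl h
        · exact Or.inr ⟨q, List.mem_cons_of_mem _ hq, h⟩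
      · rintro (h | ⟨q, hq, h⟩)
        · exact Or.inl h
        · rcases List.mem_cons.mp hq with rfl | hq
          · exact absurd h.1 hp
          · exact Or.inr ⟨q, hq, h⟩

-- The progression generated for p contains exactly the positive frets sounding pitch class p.
theorem mem_progression (string_pc max_fret p f : Int) (hp : 0 ≤ p ∧ p ≤ 11) :
    f ∈ PySem.List.pyRange
          (if 1 ≤ PySem.Int.mod (p - string_pc) 12 then PySem.Int.mod (p - string_pc) 12 else 12)
          (max_fret + 1) 12 ↔
      1 ≤ f ∧ f ≤ max_fret ∧ (string_pc + f) % 12 = p := by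
  rw [PySem.List.mem_pyRange_iff_of_pos (by norm_num)]
  rw [PySem.Int.mod_eq_emod_of_pos (by norm_num : (0:Int) < 12)]
  split <;> omega

-- B's set has no duplicates.
theorem nodup_B_foldl (string_pc max_fret : Int) (l : List Int) (s0 : PySem.Set Int)
    (h0 : s0.Nodup) :
    (l.foldl
        (fun res p =>
          if 0 ≤ p ∧ p ≤ 11 then
            let base := PySem.Int.mod (p - string_pc) 12
            let start := if 1 ≤ base then base else 12
            PySem.Set.update res (PySem.List.pyRange start (max_fret + 1) 12)
          else res) s0).Nodup := by
  induction l generalizing s0 with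
  | nil => exact h0
  | cons p t ih =>
    simp only [List.foldl_cons]
    split
    · exact ih _ (PySem.Set.nodup_update _ _ h0)
    · exact ih _ h0

-- ===== VERDICT (by name: the statement is the Claim_ definition above) =====
theorem frets_for_pitch_spec : Claim_equal_frets_for_pitch := by
  intro string_pc chord_pcs max_fret _
  unfold Spec_frets_for_pitch frets_for_pitch_alt
  refine (PySem.List.sorted_eq_of_perm_of_pairwise_lt _ _ _ ?_ (pairwise_fretsA ..)).symm
  refine (List.perm_ext_iff_of_nodup (pairwise_fretsA ..).nodup ?_).mpr ?_
  · refine nodup_B_foldl _ _ _ _ ?_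
    split <;> simp [PySem.Set.add, PySem.Set.empty]
  · intro f
    rw [mem_fretsA, mem_B_foldl]
    constructor
    · rintro (⟨rfl, h⟩ | ⟨h1, h2, h3⟩)
      · exact Or.inl (by split <;> simp_all [PySem.Set.empty])
      · refine Or.inr ⟨(string_pc + f) % 12, (PySem.Set.mem_ofList _ _).mpr h3, ⟨by omega, by omega⟩, ?_⟩
        rw [mem_progression _ _ _ _ ⟨by omega, by omega⟩]
        exact ⟨h1, h2, rfl⟩
    · rintro (h | ⟨p, hp, hp11, hmem⟩)
      · split at h <;> simp_all [PySem.Set.empty]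
      · rw [mem_progression _ _ _ _ hp11] at hmem
        exact Or.inr ⟨hmem.1, hmem.2.1, hmem.2.2 ▸ (PySem.Set.mem_ofList _ _).mp hp⟩
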